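-- pv_equiv track=rewrite | github.com/allenai/rslearn_projects | rslp/landslide/scripts/rasterize_label_vectors.py | _default_draw_class_order
-- ===== SOURCE A (Python) =====
-- def _default_draw_class_order(class_names: list[str]) -> list[int]:
--     """Return class indices bottom-to-top for rasterize (later = on top).
--
--     Non-positive classes are drawn first; **positive** landslide-like classes are drawn
--     last so they are not covered by buffers. Names that contain ``landslide`` only as
--     part of ``no_landslide`` (or similar) are **not** treated as positive — otherwise
--     ``no_landslide`` would paint over ``no_data``, which matches neither the vector
--     vis order nor the intended semantics.
--     """
--     indices = list(range(len(class_names)))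
--     positive_landslide = [
--         i
--         for i, name in enumerate(class_names)
--         if "landslide" in name.lower() and "no_landslide" not in name.lower()
--     ]
--     if not positive_landslide:
--         return indices
--     rest = [i for i in indices if i not in positive_landslide]
--     return rest + positive_landslide
-- ===== SOURCE B (Python) =====
-- def _default_draw_class_order(class_names: list[str]) -> list[int]:
--     """Single classifying pass: append each index to `rest` or `positive`
--     as the predicate decides, then return rest + positive.  No membership
--     filtering pass; the empty-positive case falls out naturally."""
--     rest: list[int] = []
--     positive: list[int] = []
--     for i, name in enumerate(class_names):
--         n = name.lower()
--         if "landslide" in n and "no_landslide" not in n: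
--             positive.append(i)
--         else:
--             rest.append(i)
--     return rest + positive
-- ===== Notes on version B (the rewrite author's own statement) =====
-- stated objective: simpler
-- what changed: Replaces A's two-phase build-positives-then-filter-indices-by-membership structure with a single classifying pass that appends each index to rest or positive, returning rest + positive; the membership test and the empty-positive early return disappear.
import Mathlib
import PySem

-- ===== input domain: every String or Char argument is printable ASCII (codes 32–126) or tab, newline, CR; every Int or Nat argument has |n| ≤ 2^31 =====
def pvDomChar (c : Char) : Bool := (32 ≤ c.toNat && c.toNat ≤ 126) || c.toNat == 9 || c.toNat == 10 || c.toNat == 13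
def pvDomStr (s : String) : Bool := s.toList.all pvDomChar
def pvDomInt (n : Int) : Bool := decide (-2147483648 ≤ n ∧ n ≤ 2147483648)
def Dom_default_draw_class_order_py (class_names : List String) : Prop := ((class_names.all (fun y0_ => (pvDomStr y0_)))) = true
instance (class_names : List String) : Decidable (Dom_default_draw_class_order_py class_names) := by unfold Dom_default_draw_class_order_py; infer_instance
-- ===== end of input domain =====

-- B changes A's two-phase structure (build positives, then filter indices by membership)
-- into one classifying pass; objective: simpler (no membership scan, no early return).

-- ===== PORT A =====
-- '"landslide" in name.lower() and "no_landslide" not in name.lower()'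
def pvPredA (name : String) : Bool :=
  PySem.Str.isIn "landslide" (PySem.Str.lower name) &&
    !(PySem.Str.isIn "no_landslide" (PySem.Str.lower name))

def default_draw_class_order_py (class_names : List String) : List Int :=
  let indices := PySem.List.pyRange 0 class_names.length 1
  let positive_landslide :=
    ((PySem.List.enumerate class_names).filter (fun x => pvPredA x.2)).map (·.1)
  if positive_landslide.isEmpty then indices
  else
    let rest := indices.filter (fun i => !(positive_landslide.contains i))
    rest ++ positive_landslide

-- ===== PORT B =====
-- predicate applied to the already-lowered name (B computes n = name.lower() once)
def pvPredB (n : String) : Bool :=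
  PySem.Str.isIn "landslide" n && !(PySem.Str.isIn "no_landslide" n)

def default_draw_class_order_py_alt (class_names : List String) : List Int :=
  let p := (PySem.List.enumerate class_names).foldl
    (fun (acc : List Int × List Int) x =>
      let n := PySem.Str.lower x.2
      if pvPredB n then (acc.1, acc.2 ++ [x.1]) else (acc.1 ++ [x.1], acc.2))
    ([], [])
  p.1 ++ p.2

-- ===== PRECONDITION & SPEC =====
def Spec_default_draw_class_order_py (class_names : List String) (out : List Int) : Prop := out = default_draw_class_order_py_alt class_names
instance (class_names : List String) (out : List Int) : Decidable (Spec_default_draw_class_order_py class_names out) := by unfold Spec_default_draw_class_order_py; infer_instance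

-- ===== CLAIM (what is proved, stated in full; the proofs are below) =====
def Claim_equal_default_draw_class_order_py : Prop := ∀ (class_names : List String), Dom_default_draw_class_order_py class_names → Spec_default_draw_class_order_py class_names (default_draw_class_order_py class_names)

-- ===== LEMMAS AND PROOFS =====

-- B's loop, described as two filters of the enumerated list
theorem pv_foldl_partition (e : List (Int × String)) (r p : List Int) :
    e.foldl
      (fun (acc : List Int × List Int) x =>
        let n := PySem.Str.lower x.2
        if pvPredB n then (acc.1, acc.2 ++ [x.1]) else (acc.1 ++ [x.1], acc.2))
      (r, p)
    = (r ++ (e.filter (fun x => !pvPredB (PySem.Str.lower x.2))).map (·.1),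
       p ++ (e.filter (fun x => pvPredB (PySem.Str.lower x.2))).map (·.1)) := by
  induction e generalizing r p with
  | nil => simp
  | cons x xs ih =>
    by_cases h : pvPredB (PySem.Str.lower x.2) = true
    · simp [List.foldl_cons, h, ih]
    · simp only [Bool.not_eq_true] at h
      simp [List.foldl_cons, h, ih]

theorem pv_nodup_fst (xs : List String) :
    ((PySem.List.enumerate xs 0).map (·.1)).Nodup := by
  rw [PySem.List.map_fst_enumerate]
  exact PySem.List.nodup_pyRange_one _ _

theorem pv_contains_positive (xs : List String) (x : Int × String)
    (hx : x ∈ PySem.List.enumerate xs 0) :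
    (((PySem.List.enumerate xs 0).filter (fun y => pvPredA y.2)).map (·.1)).contains x.1
      = pvPredA x.2 := by
  by_cases h : pvPredA x.2 = true
  · simp only [List.contains_eq_mem, h, decide_eq_true_eq, List.mem_map, List.mem_filter]
    exact ⟨x, ⟨hx, h⟩, rfl⟩
  · simp only [Bool.not_eq_true] at h
    simp only [List.contains_eq_mem, h, decide_eq_false_iff_not, List.mem_map,
      List.mem_filter]
    rintro ⟨y, ⟨hy, hpy⟩, hfst⟩
    have := List.inj_on_of_nodup_map (pv_nodup_fst xs) hy hx hfst
    rw [this] at hpy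
    simp [h] at hpy

-- ===== VERDICT (by name: the statement is the Claim_ definition above) =====
theorem default_draw_class_order_py_spec : Claim_equal_default_draw_class_order_py := by
  intro class_names _
  unfold Spec_default_draw_class_order_py default_draw_class_order_py default_draw_class_order_py_alt
  simp only [pv_foldl_partition, List.nil_append]
  set e := PySem.List.enumerate class_names 0 with he
  have hpred : ∀ x : Int × String, pvPredA x.2 = pvPredB (PySem.Str.lower x.2) :=
    fun x => rfl
  have hfilt : e.filter (fun x => pvPredB (PySem.Str.lower x.2)) = e.filter (fun x => pvPredA x.2) := by
    simp [hpred]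
  have hfiltn : e.filter (fun x => !pvPredB (PySem.Str.lower x.2)) = e.filter (fun x => !pvPredA x.2) := by
    simp [hpred]
  rw [hfilt, hfiltn]
  have hind : PySem.List.pyRange 0 (class_names.length : Int) 1 = e.map (·.1) := by
    rw [he, PySem.List.map_fst_enumerate]; norm_num
  by_cases hpos : ((e.filter (fun x => pvPredA x.2)).map (·.1)).isEmpty = true
  · -- positive empty: every element fails the predicate, rest = all indices
    simp only [hpos, if_true]
    have h0 : e.filter (fun x => pvPredA x.2) = [] := by
      simpa using hpos
    have hall : ∀ x ∈ e, pvPredA x.2 = false := by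
      intro x hx
      by_contra hc
      have : x ∈ e.filter (fun x => pvPredA x.2) :=
        List.mem_filter.mpr ⟨hx, by simpa using hc⟩
      simp [h0] at this
    have : e.filter (fun x => !pvPredA x.2) = e :=
      List.filter_eq_self.mpr (by intro x hx; simp [hall x hx])
    rw [h0, this, hind]; simp
  · simp only [hpos, Bool.false_eq_true, if_false]
    congr 1
    rw [hind, List.filter_map]
    congr 1
    apply List.filter_congr
    intro x hx
    rw [he] at hx ⊢
    simp only [Function.comp_apply]
    rw [pv_contains_positive class_names x hx]
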